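-- pv_equiv track=rewrite | github.com/yangxiaoxiaoly/AttrAlign | process_attr.py | process_attr
-- ===== SOURCE A (Python) =====
-- def process_attr(attr):
--     ent_attr_v_dic = {} #实体：（属性、属性值、类型）
--     attr_v_dic = {} #属性：属性值
--     attr_vn_dic = {} #属性：属性值个数
--     attr_fre = {} #属性：出现次数
--     ent_v_dic = {}  #实体：属性值
--     ent_attr_dic = {}  #实体：属性
--     for i in attr:
--         if i[0] in ent_attr_v_dic:
--             ent_attr_v_dic[i[0]].append([i[1], i[2]])
--         else:
--             ent_attr_v_dic[i[0]] = [[i[1], i[2]]]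
--     for i in attr:
--         if i[1] in attr_v_dic:
--             attr_v_dic[i[1]].append(i[2])
--         else:
--             attr_v_dic[i[1]] = [i[2]]
--     for i in attr_v_dic:
--         attr_vn_dic[i] = len(attr_v_dic[i])
--     attr_vn_dic = dict(sorted(attr_vn_dic.items(), key=lambda x: x[1]))
--     for i in attr:
--         if i[1]in attr_fre:
--             attr_fre[i[1]] += 1
--         else:
--             attr_fre[i[1]] = 1
--     attr_fre = dict(sorted(attr_fre.items(), key=lambda x: x[1]))
--     for i in attr:
--         if i[0] in ent_v_dic:
--             ent_v_dic[i[0]].append(i[2])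
--         else:
--             ent_v_dic[i[0]] = [i[2]]
--     for i in attr:
--         if i[0] in ent_attr_dic:
--             ent_attr_dic[i[0]].append(i[1])
--         else:
--             ent_attr_dic[i[0]] = [i[1]]
--     return ent_attr_v_dic, attr_vn_dic, attr_fre, ent_v_dic, ent_attr_dic
-- ===== SOURCE B (Python) =====
-- def process_attr(attr):
--     # One pass over attr builds all per-entity dicts and the attribute counter;
--     # attr_vn_dic equals attr_fre (len of each value list == occurrence count),
--     # so both sorted outputs come from the single counter.
--     ent_attr_v_dic = {}
--     ent_v_dic = {}
--     ent_attr_dic = {}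
--     attr_fre = {}
--     for e, a, v in attr:
--         ent_attr_v_dic.setdefault(e, []).append([a, v])
--         ent_v_dic.setdefault(e, []).append(v)
--         ent_attr_dic.setdefault(e, []).append(a)
--         attr_fre[a] = attr_fre.get(a, 0) + 1
--     fre_sorted = dict(sorted(attr_fre.items(), key=lambda x: x[1]))
--     return ent_attr_v_dic, fre_sorted, dict(fre_sorted), ent_v_dic, ent_attr_dic
-- ===== Notes on version B (the rewrite author's own statement) =====
-- stated objective: alternative
-- what changed: B replaces A's six sequential scans of attr by a single pass that builds the three per-entity dicts and one attribute counter simultaneously (setdefault/append and a get-based counter), drops the intermediate attr_v_dic entirely, and derives both attr_vn_dic and attr_fre from that one counter since len of each value list equals the occurrence count.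
import Mathlib
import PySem

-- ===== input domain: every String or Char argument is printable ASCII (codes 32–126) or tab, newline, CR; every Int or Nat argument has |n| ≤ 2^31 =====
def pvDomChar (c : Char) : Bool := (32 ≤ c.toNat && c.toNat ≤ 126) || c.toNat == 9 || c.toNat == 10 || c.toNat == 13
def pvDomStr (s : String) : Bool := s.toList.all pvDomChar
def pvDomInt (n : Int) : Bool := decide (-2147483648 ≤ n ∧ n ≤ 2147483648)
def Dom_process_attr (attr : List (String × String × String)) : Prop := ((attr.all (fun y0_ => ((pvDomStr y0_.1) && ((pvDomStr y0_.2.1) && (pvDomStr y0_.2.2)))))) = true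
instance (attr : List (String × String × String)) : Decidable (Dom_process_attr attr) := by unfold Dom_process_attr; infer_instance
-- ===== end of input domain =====

-- B replaces A's six sequential scans by ONE pass building all dicts at once and derives both
-- sorted outputs from a single attribute counter (len of each value list = occurrence count).
-- Equivalence of RETURN VALUES is what is proved.

-- ===== PORT A =====
def process_attr (attr : List (String × String × String)) : (List (String × List (List String))) × (List (String × Int)) × (List (String × Int)) × (List (String × List String)) × (List (String × List String)) :=
  -- loop 1: ent_attr_v_dic (append [a,v] under entity; if/else as in the Python)
  let ent_attr_v := attr.foldl (fun d i =>
      if d.contains i.1 then d.insert i.1 (d.getD i.1 [] ++ [[i.2.1, i.2.2]])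
      else d.insert i.1 [[i.2.1, i.2.2]]) (PySem.Dict.empty : PySem.Dict String (List (List String)))
  -- loop 2: attr_v_dic (append v under attribute)
  let attr_v := attr.foldl (fun d i =>
      if d.contains i.2.1 then d.insert i.2.1 (d.getD i.2.1 [] ++ [i.2.2])
      else d.insert i.2.1 [i.2.2]) (PySem.Dict.empty : PySem.Dict String (List String))
  -- loop 3: attr_vn_dic[i] = len(attr_v_dic[i]) for i in attr_v_dic
  let attr_vn := attr_v.keys.foldl (fun d k =>
      d.insert k (PySem.List.len (attr_v.getD k []))) (PySem.Dict.empty : PySem.Dict String Int)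
  -- attr_vn_dic = dict(sorted(attr_vn_dic.items(), key=lambda x: x[1]))
  let attr_vn_s := PySem.Dict.ofList (PySem.List.sorted attr_vn.items (fun x => x.2) false)
  -- loop 4: attr_fre (count attribute occurrences)
  let attr_fre := attr.foldl (fun d i =>
      if d.contains i.2.1 then d.insert i.2.1 (d.getD i.2.1 0 + 1)
      else d.insert i.2.1 1) (PySem.Dict.empty : PySem.Dict String Int)
  -- attr_fre = dict(sorted(attr_fre.items(), key=lambda x: x[1]))
  let attr_fre_s := PySem.Dict.ofList (PySem.List.sorted attr_fre.items (fun x => x.2) false)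
  -- loop 5: ent_v_dic (append v under entity)
  let ent_v := attr.foldl (fun d i =>
      if d.contains i.1 then d.insert i.1 (d.getD i.1 [] ++ [i.2.2])
      else d.insert i.1 [i.2.2]) (PySem.Dict.empty : PySem.Dict String (List String))
  -- loop 6: ent_attr_dic (append a under entity)
  let ent_attr := attr.foldl (fun d i =>
      if d.contains i.1 then d.insert i.1 (d.getD i.1 [] ++ [i.2.1])
      else d.insert i.1 [i.2.1]) (PySem.Dict.empty : PySem.Dict String (List String))
  (ent_attr_v.items, attr_vn_s.items, attr_fre_s.items, ent_v.items, ent_attr.items)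

-- ===== PORT B =====
def process_attr_alt (attr : List (String × String × String)) : (List (String × List (List String))) × (List (String × Int)) × (List (String × Int)) × (List (String × List String)) × (List (String × List String)) :=
  -- one pass; d.setdefault(k, []).append(x) ported exactly as d.modify k [] (· ++ [x])
  let st := attr.foldl
    (fun (s : PySem.Dict String (List (List String)) × PySem.Dict String (List String) × PySem.Dict String (List String) × PySem.Dict String Int) i =>
      (s.1.modify i.1 [] (· ++ [[i.2.1, i.2.2]]),
       s.2.1.modify i.1 [] (· ++ [i.2.2]),
       s.2.2.1.modify i.1 [] (· ++ [i.2.1]),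
       s.2.2.2.insert i.2.1 (s.2.2.2.getD i.2.1 0 + 1)))
    (PySem.Dict.empty, PySem.Dict.empty, PySem.Dict.empty, PySem.Dict.empty)
  -- fre_sorted = dict(sorted(attr_fre.items(), key=lambda x: x[1])); dict(fre_sorted) is a copy
  let fre := PySem.Dict.ofList (PySem.List.sorted st.2.2.2.items (fun x => x.2) false)
  (st.1.items, fre.items, (PySem.Dict.ofList fre.items).items, st.2.1.items, st.2.2.1.items)

-- ===== PRECONDITION & SPEC =====
def Spec_process_attr (attr : List (String × String × String)) (out : (List (String × List (List String))) × (List (String × Int)) × (List (String × Int)) × (List (String × List String)) × (List (String × List String))) : Prop := out = process_attr_alt attr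
instance (attr : List (String × String × String)) (out : (List (String × List (List String))) × (List (String × Int)) × (List (String × Int)) × (List (String × List String)) × (List (String × List String))) : Decidable (Spec_process_attr attr out) := by
  unfold Spec_process_attr
  have h2 : DecidableEq (List (String × List String) × List (String × List String)) := inferInstance
  have h3 : DecidableEq (List (String × Int) × List (String × List String) × List (String × List String)) := @instDecidableEqProd _ _ _ h2
  have h4 : DecidableEq (List (String × Int) × List (String × Int) × List (String × List String) × List (String × List String)) := @instDecidableEqProd _ _ _ h3
  exact @instDecidableEqProd _ _ _ h4 out (process_attr_alt attr)

-- ===== CLAIM (what is proved, stated in full; the proofs are below) =====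
def Claim_equal_process_attr : Prop := ∀ (attr : List (String × String × String)), Dom_process_attr attr → Spec_process_attr attr (process_attr attr)

-- ===== LEMMAS AND PROOFS =====

-- modify is insert of the updated lookup (fact about the two step functions used here)
lemma pv_modify_eq_insert_getD {ν : Type} (d : PySem.Dict String ν) (k : String) (d0 : ν) (f : ν → ν) :
    d.modify k d0 f = d.insert k (f (d.getD k d0)) := by
  simp [PySem.Dict.modify, PySem.Dict.insert, PySem.Dict.getD, PySem.Dict.get?, PySem.Dict.contains]

-- A's if/else grouping step is exactly B's modify step
lemma pv_groupStep_eq {ν : Type} (d : PySem.Dict String (List ν)) (k : String) (x : ν) :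
    (if d.contains k then d.insert k (d.getD k [] ++ [x]) else d.insert k [x])
      = d.modify k [] (· ++ [x]) := by
  rw [pv_modify_eq_insert_getD]
  cases h : d.contains k with
  | true => simp
  | false => simp [PySem.Dict.getD_of_not_contains (h := h)]

-- A's if/else counting step is B's unconditional insert step
lemma pv_cntStep_eq (d : PySem.Dict String Int) (k : String) :
    (if d.contains k then d.insert k (d.getD k 0 + 1) else d.insert k 1)
      = d.insert k (d.getD k 0 + 1) := by
  cases h : d.contains k with
  | true => simp
  | false => simp [PySem.Dict.getD_of_not_contains (h := h)]

-- a fold with four independent accumulators is four folds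
lemma pv_foldl_prod4 {α β γ δ ε : Type} (l : List ε) (f1 : α → ε → α) (f2 : β → ε → β)
    (f3 : γ → ε → γ) (f4 : δ → ε → δ) (a : α) (b : β) (c : γ) (d : δ) :
    l.foldl (fun s i => (f1 s.1 i, f2 s.2.1 i, f3 s.2.2.1 i, f4 s.2.2.2 i)) (a, b, c, d)
      = (l.foldl f1 a, l.foldl f2 b, l.foldl f3 c, l.foldl f4 d) := by
  induction l generalizing a b c d with
  | nil => rfl
  | cons x xs ih => simp [List.foldl_cons, ih]

-- the vn dict A derives from the grouping dict has the same items as the counter dict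
lemma pv_vn_items_eq_cnt_items (attr : List (String × String × String)) :
    (((attr.foldl (fun d i => d.modify i.2.1 [] (· ++ [i.2.2]))
        (PySem.Dict.empty : PySem.Dict String (List String))).keys).foldl
      (fun d k => d.insert k (PySem.List.len
        ((attr.foldl (fun d i => d.modify i.2.1 [] (· ++ [i.2.2]))
          (PySem.Dict.empty : PySem.Dict String (List String))).getD k [])))
      (PySem.Dict.empty : PySem.Dict String Int)).items
    = (attr.foldl (fun d i => d.insert i.2.1 (d.getD i.2.1 0 + 1))
        (PySem.Dict.empty : PySem.Dict String Int)).items := by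
  have hr : attr.foldl (fun d i => d.insert i.2.1 (d.getD i.2.1 0 + 1))
      (PySem.Dict.empty : PySem.Dict String Int)
      = PySem.Dict.counter (attr.map (fun i => i.2.1)) := by
    rw [← List.foldl_map (f := fun i : String × String × String => i.2.1)
      (g := fun (d : PySem.Dict String Int) x => d.insert x (d.getD x 0 + 1))]
    rw [PySem.Dict.foldl_insert_getD_add_one_eq_counter]
  have hg : attr.foldl (fun d i => d.modify i.2.1 [] (· ++ [i.2.2]))
      (PySem.Dict.empty : PySem.Dict String (List String))
      = (attr.map (fun i => (i.2.1, i.2.2))).foldl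
          (fun d p => d.modify p.1 [] (· ++ [p.2])) PySem.Dict.empty := by
    rw [List.foldl_map (f := fun i : String × String × String => (i.2.1, i.2.2))
      (g := fun (d : PySem.Dict String (List String)) (p : String × String) => d.modify p.1 [] (· ++ [p.2]))]
  rw [hr, hg]
  have hkeys : ((attr.map (fun i => (i.2.1, i.2.2))).foldl
      (fun d p => d.modify p.1 [] (· ++ [p.2]))
      (PySem.Dict.empty : PySem.Dict String (List String))).keys
      = PySem.Set.ofList (attr.map (fun i => i.2.1)) := by
    rw [PySem.Dict.keys_foldl_modify_key (attr.map (fun i => (i.2.1, i.2.2))) Prod.fst []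
      (fun _ p => (· ++ [p.2])) PySem.Dict.empty]
    rw [PySem.Dict.keys_empty, PySem.Set.update_nil_left]
    simp only [List.map_map]
    rfl
  rw [hkeys]
  rw [PySem.Dict.items_foldl_insert_fresh (PySem.Set.ofList (attr.map (fun i => i.2.1)))
    (fun a => a)
    (fun k => PySem.List.len (((attr.map (fun i => (i.2.1, i.2.2))).foldl
      (fun (d : PySem.Dict String (List String)) (p : String × String) =>
        d.modify p.1 [] (fun x => x ++ [p.2])) PySem.Dict.empty).getD k []))
    PySem.Dict.empty
    (fun a _ => PySem.Dict.contains_empty a)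
    (by simp)]
  rw [PySem.Dict.items_counter]
  refine List.map_congr_left (fun k _ => ?_)
  rw [PySem.Dict.getD_foldl_modify_append]
  rw [PySem.Dict.getD_empty]
  simp [PySem.List.len_eq, List.count, List.countP_map, Function.comp_def,
    ← List.countP_eq_length_filter]

-- a dict rebuilt from its own (nodup-keyed) items list has the same items
lemma pv_ofList_items {ν : Type} (l : List (String × ν)) (h : (l.map (fun p => p.1)).Nodup) :
    (PySem.Dict.ofList l).items = l := by
  have hdef : PySem.Dict.ofList l = l.foldl (fun d p => d.insert p.1 p.2) PySem.Dict.empty := rfl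
  rw [hdef, PySem.Dict.items_foldl_insert_fresh l (fun p => p.1) (fun p => p.2) PySem.Dict.empty
    (fun a _ => PySem.Dict.contains_empty a.1) h]
  have hemp : (PySem.Dict.empty : PySem.Dict String ν).items = [] := rfl
  rw [hemp]
  simp

-- the sorted counter items still have pairwise-distinct keys
lemma pv_sorted_cnt_keys_nodup (attr : List (String × String × String)) :
    ((PySem.List.sorted ((attr.foldl (fun d i => d.insert i.2.1 (d.getD i.2.1 0 + 1))
        (PySem.Dict.empty : PySem.Dict String Int)).items) (fun x => x.2) false).map
      (fun p => p.1)).Nodup := by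
  have h1 : (((attr.foldl (fun d i => d.insert i.2.1 (d.getD i.2.1 0 + 1))
      (PySem.Dict.empty : PySem.Dict String Int)).items).map (fun p => p.1)).Nodup := by
    have := PySem.Dict.nodup_keys_foldl_insert_key attr (fun i => i.2.1)
      (fun (d : PySem.Dict String Int) i => d.getD i.2.1 0 + 1)
      (PySem.Dict.empty : PySem.Dict String Int) PySem.Dict.nodup_keys_empty
    simpa [PySem.Dict.keys] using this
  have hperm := PySem.List.sorted_perm ((attr.foldl (fun d i => d.insert i.2.1 (d.getD i.2.1 0 + 1))
      (PySem.Dict.empty : PySem.Dict String Int)).items) (fun x => x.2) false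
  exact ((hperm.map (fun p => p.1)).nodup_iff).mpr h1

theorem pv_main (attr : List (String × String × String)) :
    process_attr attr = process_attr_alt attr := by
  simp only [process_attr, process_attr_alt]
  rw [pv_foldl_prod4 attr
    (fun (d : PySem.Dict String (List (List String))) (i : String × String × String) =>
      d.modify i.1 [] (· ++ [[i.2.1, i.2.2]]))
    (fun (d : PySem.Dict String (List String)) (i : String × String × String) =>
      d.modify i.1 [] (· ++ [i.2.2]))
    (fun (d : PySem.Dict String (List String)) (i : String × String × String) =>
      d.modify i.1 [] (· ++ [i.2.1]))
    (fun (d : PySem.Dict String Int) (i : String × String × String) =>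
      d.insert i.2.1 (d.getD i.2.1 0 + 1))
    PySem.Dict.empty PySem.Dict.empty PySem.Dict.empty PySem.Dict.empty]
  simp only [pv_groupStep_eq, pv_cntStep_eq]
  rw [pv_vn_items_eq_cnt_items]
  rw [pv_ofList_items _ (pv_sorted_cnt_keys_nodup attr)]
  rw [pv_ofList_items _ (pv_sorted_cnt_keys_nodup attr)]

-- ===== VERDICT (by name: the statement is the Claim_ definition above) =====
theorem process_attr_spec : Claim_equal_process_attr := by
  intro attr _
  unfold Spec_process_attr
  exact pv_main attr
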